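-- pv_equiv track=rewrite | github.com/tomasvanagas/prime-research | experiments/wildcard/etale_counting.py | weil_point_count
-- ===== SOURCE A (Python) =====
-- def weil_point_count(p, coefficients):
--     """
--     Compute |C(F_p)| for a hyperelliptic curve y² = f(x)
--     using the Weil bound and character sums.
--
--     For y² = f(x) over F_p, the count is:
--     |C(F_p)| = p + 1 + Σ_{x=0}^{p-1} (f(x)/p)
--     where (·/p) is the Legendre symbol.
--     """
--     count = 0
--     for x in range(p):
--         fx = sum(c * pow(x, i, p) for i, c in enumerate(coefficients)) % p
--         if fx == 0:
--             count += 1  # y = 0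
--         elif pow(fx, (p - 1) // 2, p) == 1:
--             count += 2  # two y values
--     # Add point at infinity (for odd degree)
--     if len(coefficients) % 2 == 0:
--         count += 1  # one point at infinity
--
--     return count
-- ===== SOURCE B (Python) =====
-- def weil_point_count(p, coefficients):
--     # Same count, different decomposition: Horner evaluation of f(x) mod p
--     # (no per-term modular exponentiation) and the infinity point hoisted to the
--     # initial value; the Euler-criterion exponent is computed once outside the loop.
--     count = 1 if len(coefficients) % 2 == 0 else 0
--     e = (p - 1) // 2
--     for x in range(p):
--         fx = 0
--         for c in reversed(coefficients):
--             fx = (fx * x + c) % p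
--         if fx == 0:
--             count += 1
--         elif pow(fx, e, p) == 1:
--             count += 2
--     return count
-- ===== Notes on version B (the rewrite author's own statement) =====
-- stated objective: alternative
-- what changed: Evaluates f(x) by Horner's rule with one mod per coefficient instead of summing c*pow(x,i,p) term-by-term with a modular exponentiation per term, hoists the point-at-infinity contribution into the initial count and the Euler-criterion exponent out of the loop (intended as a constant-factor speedup; measured 6.9x at the sizes both finish, unconfirmed at the largest).
import Mathlib
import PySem

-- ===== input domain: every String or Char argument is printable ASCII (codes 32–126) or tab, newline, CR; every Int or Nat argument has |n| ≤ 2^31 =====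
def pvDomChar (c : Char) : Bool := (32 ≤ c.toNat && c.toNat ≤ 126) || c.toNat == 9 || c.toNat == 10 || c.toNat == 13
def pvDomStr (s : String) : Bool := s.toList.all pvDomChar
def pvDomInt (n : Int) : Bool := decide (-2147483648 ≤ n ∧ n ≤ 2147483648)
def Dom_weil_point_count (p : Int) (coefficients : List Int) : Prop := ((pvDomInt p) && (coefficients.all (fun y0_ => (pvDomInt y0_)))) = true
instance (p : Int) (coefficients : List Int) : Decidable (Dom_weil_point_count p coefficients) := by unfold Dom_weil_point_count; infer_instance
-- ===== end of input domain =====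

-- B replaces A's per-term modular exponentiation with a Horner evaluation of f(x) mod p,
-- hoists the point at infinity into the initial count and the Euler exponent out of the loop.


-- ===== PORT A =====
def weil_point_count (p : Int) (coefficients : List Int) : Int :=
  let count : Int :=
    (PySem.List.pyRange 0 p 1).foldl (fun count x =>
      let fx := PySem.Int.mod
        ((PySem.List.enumerate coefficients).foldl
          (fun s ic => s + ic.2 * PySem.Int.powMod x ic.1.toNat p) 0) p
      if fx = 0 then count + 1
      else if PySem.Int.powMod fx (PySem.Int.floordiv (p - 1) 2).toNat p = 1 then count + 2
      else count) 0
  if coefficients.length % 2 = 0 then count + 1 else count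

-- ===== PORT B =====
def weil_point_count_alt (p : Int) (coefficients : List Int) : Int :=
  let count0 : Int := if coefficients.length % 2 = 0 then 1 else 0
  let e := PySem.Int.floordiv (p - 1) 2
  (PySem.List.pyRange 0 p 1).foldl (fun count x =>
    let fx := coefficients.reverse.foldl (fun fx c => PySem.Int.mod (fx * x + c) p) 0
    if fx = 0 then count + 1
    else if PySem.Int.powMod fx e.toNat p = 1 then count + 2
    else count) count0

-- ===== PRECONDITION & SPEC =====
def Spec_weil_point_count (p : Int) (coefficients : List Int) (out : Int) : Prop := out = weil_point_count_alt p coefficients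
instance (p : Int) (coefficients : List Int) (out : Int) : Decidable (Spec_weil_point_count p coefficients out) := by unfold Spec_weil_point_count; infer_instance

-- ===== CLAIM (what is proved, stated in full; the proofs are below) =====
def Claim_equal_weil_point_count : Prop := ∀ (p : Int) (coefficients : List Int), Dom_weil_point_count p coefficients → Spec_weil_point_count p coefficients (weil_point_count p coefficients)

-- ===== LEMMAS AND PROOFS =====

-- Horner polynomial value (no mod)
def pvHorner (x : Int) (l : List Int) : Int := l.foldr (fun c fx => fx * x + c) 0

-- per-x increments of the two loops
def pvIncA (p : Int) (l : List Int) (x : Int) : Int :=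
  let fx := PySem.Int.mod
    ((PySem.List.enumerate l).foldl
      (fun s ic => s + ic.2 * PySem.Int.powMod x ic.1.toNat p) 0) p
  if fx = 0 then 1
  else if PySem.Int.powMod fx (PySem.Int.floordiv (p - 1) 2).toNat p = 1 then 2
  else 0

def pvIncB (p : Int) (l : List Int) (x : Int) : Int :=
  let fx := l.reverse.foldl (fun fx c => PySem.Int.mod (fx * x + c) p) 0
  if fx = 0 then 1
  else if PySem.Int.powMod fx (PySem.Int.floordiv (p - 1) 2).toNat p = 1 then 2
  else 0

lemma pvFoldlInc {β : Type} (L : List β) (f : Int → β → Int) (g : β → Int) (init : Int)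
    (h : ∀ a x, f a x = a + g x) : L.foldl f init = init + (L.map g).sum := by
  induction L generalizing init with
  | nil => simp
  | cons a t ih => rw [List.foldl_cons, h, ih]; simp; ring

lemma pvMod_key (p x a b : Int) : (a % p * x + b) % p = (a * x + b) % p := by
  conv_rhs => rw [Int.add_emod, Int.mul_emod]
  conv_lhs => rw [Int.add_emod, Int.mul_emod, Int.emod_emod_of_dvd _ dvd_rfl]

lemma pvMod_key2 (p a b : Int) : (a * (b % p)) % p = (a * b) % p := by
  rw [Int.mul_emod, Int.emod_emod_of_dvd _ dvd_rfl, ← Int.mul_emod]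

lemma pvHornerB_eq (p x : Int) (hp : 0 < p) (l : List Int) :
    l.reverse.foldl (fun fx c => PySem.Int.mod (fx * x + c) p) 0
      = pvHorner x l % p := by
  rw [List.foldl_reverse]
  induction l with
  | nil => simp [pvHorner]
  | cons c t ih =>
    simp only [List.foldr_cons, pvHorner] at *
    rw [PySem.Int.mod_eq_emod_of_pos hp, ih, pvMod_key]

lemma pvSumA_eq (p x : Int) (hp : 0 < p) (l : List Int) : ∀ n : Nat,
    (((PySem.List.enumerate l (n : Int)).map
        (fun ic => ic.2 * PySem.Int.powMod x ic.1.toNat p)).sum) % p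
      = (x ^ n * pvHorner x l) % p := by
  induction l with
  | nil => intro n; simp [PySem.List.enumerate, pvHorner]
  | cons c t ih =>
    intro n
    rw [PySem.List.enumerate_cons]
    have hcast : ((n : Int) + 1) = ((n + 1 : Nat) : Int) := by push_cast; ring
    simp only [List.map_cons, List.sum_cons]
    rw [Int.add_emod, hcast, ih (n + 1)]
    have h1 : (c * PySem.Int.powMod x ((n : Int)).toNat p) % p = (c * x ^ n) % p := by
      simp only [PySem.Int.powMod, Int.toNat_natCast,
        PySem.Int.mod_eq_emod_of_pos hp, pvMod_key2]
    rw [h1, ← Int.add_emod]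
    have : c * x ^ n + x ^ (n + 1) * pvHorner x t
        = x ^ n * pvHorner x (c :: t) := by
      simp only [pvHorner, List.foldr_cons]; ring
    rw [this]

-- the two per-x increments agree when 0 < p
lemma pvInc_eq (p : Int) (l : List Int) (x : Int) (hp : 0 < p) :
    pvIncA p l x = pvIncB p l x := by
  have hfx : PySem.Int.mod
      ((PySem.List.enumerate l).foldl
        (fun s ic => s + ic.2 * PySem.Int.powMod x ic.1.toNat p) 0) p
      = l.reverse.foldl (fun fx c => PySem.Int.mod (fx * x + c) p) 0 := by
    rw [pvHornerB_eq p x hp l, PySem.Int.mod_eq_emod_of_pos hp,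
      pvFoldlInc (PySem.List.enumerate l)
        (fun s ic => s + ic.2 * PySem.Int.powMod x ic.1.toNat p)
        (fun ic => ic.2 * PySem.Int.powMod x ic.1.toNat p) 0 (fun _ _ => rfl)]
    have h0 := pvSumA_eq p x hp l 0
    simpa using h0
  simp only [pvIncA, pvIncB, hfx]

-- each port equals "initial count + sum of increments"
lemma pvA_eq (p : Int) (l : List Int) :
    weil_point_count p l
      = (if l.length % 2 = 0 then 1 else 0)
        + ((PySem.List.pyRange 0 p 1).map (pvIncA p l)).sum := by
  simp only [weil_point_count]
  have hstep : (fun (count x : Int) =>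
      let fx := PySem.Int.mod
        ((PySem.List.enumerate l).foldl
          (fun s ic => s + ic.2 * PySem.Int.powMod x ic.1.toNat p) 0) p
      if fx = 0 then count + 1
      else if PySem.Int.powMod fx (PySem.Int.floordiv (p - 1) 2).toNat p = 1 then count + 2
      else count)
      = fun (count x : Int) => count + pvIncA p l x := by
    funext c x
    simp only [pvIncA]
    split_ifs <;> ring
  rw [pvFoldlInc _ _ (pvIncA p l) 0 (fun a x => congrFun (congrFun hstep a) x)]
  split_ifs <;> ring

lemma pvB_eq (p : Int) (l : List Int) :
    weil_point_count_alt p l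
      = (if l.length % 2 = 0 then 1 else 0)
        + ((PySem.List.pyRange 0 p 1).map (pvIncB p l)).sum := by
  simp only [weil_point_count_alt]
  have hstep : (fun (count x : Int) =>
      let fx := l.reverse.foldl (fun fx c => PySem.Int.mod (fx * x + c) p) 0
      if fx = 0 then count + 1
      else if PySem.Int.powMod fx (PySem.Int.floordiv (p - 1) 2).toNat p = 1 then count + 2
      else count)
      = fun (count x : Int) => count + pvIncB p l x := by
    funext c x
    simp only [pvIncB]
    split_ifs <;> ring
  rw [pvFoldlInc _ _ (pvIncB p l) _ (fun a x => congrFun (congrFun hstep a) x)]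

-- ===== VERDICT (by name: the statement is the Claim_ definition above) =====
theorem weil_point_count_spec : Claim_equal_weil_point_count := by
  intro p l _
  unfold Spec_weil_point_count
  rw [pvA_eq, pvB_eq]
  congr 1
  apply congrArg
  apply List.map_congr_left
  intro x hx
  rcases (PySem.List.mem_pyRange_one).1 hx with ⟨h1, h2⟩
  exact pvInc_eq p l x (by omega)
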